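-- pv_equiv track=rewrite | github.com/PrimePotato/limm | main.py | split_areas
-- ===== SOURCE A (Python) =====
-- def split_areas(s):
--     spt = s.split((', '))
--     spt2 = [a.split('/') if '/' in a else a for a in spt]
--     spt_final = []
--     for s in spt2:
--         if isinstance(s, list):
--             [spt_final.append(x) for x in s]
--         else:
--             spt_final.append(s)
--     return spt_final
-- ===== SOURCE B (Python) =====
-- def split_areas(s):
--     return s.replace('/', ', ').split(', ')
-- ===== Notes on version B (the rewrite author's own statement) =====
-- stated objective: simpler
-- what changed: B normalizes '/' into ', ' with one replace and does a single split, replacing A's nested per-token second split and the explicit flatten loop.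
import Mathlib
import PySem

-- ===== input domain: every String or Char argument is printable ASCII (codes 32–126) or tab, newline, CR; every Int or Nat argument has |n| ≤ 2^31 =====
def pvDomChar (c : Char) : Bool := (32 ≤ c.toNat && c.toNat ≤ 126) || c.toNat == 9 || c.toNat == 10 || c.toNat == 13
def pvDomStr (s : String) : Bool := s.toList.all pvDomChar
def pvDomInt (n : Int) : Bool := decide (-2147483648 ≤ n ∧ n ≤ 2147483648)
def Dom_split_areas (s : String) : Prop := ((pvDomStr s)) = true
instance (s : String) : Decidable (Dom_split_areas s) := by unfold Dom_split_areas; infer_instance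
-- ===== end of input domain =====

-- B normalizes '/' into ', ' with one replace and a single split, replacing A's nested per-token second split and the explicit flatten loop (objective: simpler).

-- ===== PORT A =====
-- spt = s.split(', '); spt2 = [a.split('/') if '/' in a else a for a in spt]; flatten by the append loop
def split_areas (s : String) : List String :=
  let spt : List String := (PySem.Str.split? s ", ").getD []
  let spt2 : List (List String ⊕ String) :=
    spt.map (fun a => if PySem.Str.isIn "/" a then Sum.inl ((PySem.Str.split? a "/").getD []) else Sum.inr a)
  spt2.foldl (fun acc x =>
    match x with
    | Sum.inl l => l.foldl (fun acc2 y => acc2 ++ [y]) acc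
    | Sum.inr a => acc ++ [a]) []

-- ===== PORT B =====
-- return s.replace('/', ', ').split(', ')
def split_areas_alt (s : String) : List String :=
  (PySem.Str.split? (PySem.Str.replace s "/" ", ") ", ").getD []

-- ===== PRECONDITION & SPEC =====
def Spec_split_areas (s : String) (out : List String) : Prop := out = split_areas_alt s
instance (s : String) (out : List String) : Decidable (Spec_split_areas s out) := by unfold Spec_split_areas; infer_instance

-- ===== CLAIM (what is proved, stated in full; the proofs are below) =====
def Claim_equal_split_areas : Prop := ∀ (s : String), Dom_split_areas s → Spec_split_areas s (split_areas s)

-- ===== LEMMAS AND PROOFS =====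

def splitCS : List Char → List (List Char)
  | [] => [[]]
  | c :: t =>
    if c = ',' ∧ t.head? = some ' ' then [] :: splitCS t.tail
    else (splitCS t).modifyHead (c :: ·)
  termination_by l => l.length
  decreasing_by all_goals simp [List.length_tail]

theorem go_spec_cs (fuel : Nat) : ∀ (l cur : List Char) (accs : List (List Char)),
    l.length ≤ fuel →
    PySem.Chars.splitOn.go [',', ' '] fuel l cur accs =
      accs.reverse ++ (splitCS l).modifyHead (cur.reverse ++ ·) := by
  induction fuel with
  | zero =>
    intro l cur accs h
    have hl : l = [] := by cases l <;> simp_all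
    subst hl
    rw [PySem.Chars.splitOn.go]
    simp [splitCS]
  | succ n ih =>
    intro l cur accs h
    cases l with
    | nil =>
      rw [PySem.Chars.splitOn.go]
      simp [splitCS]
      omega
    | cons c t =>
      rw [PySem.Chars.splitOn.go]
      by_cases hp : ([',', ' '] : List Char).isPrefixOf (c :: t) = true
      · obtain ⟨rfl, t', rfl⟩ : c = ',' ∧ ∃ t', t = ' ' :: t' := by
          cases t with
          | nil => simp [List.isPrefixOf] at hp
          | cons d t' =>
            simp [List.isPrefixOf] at hp
            exact ⟨hp.1.symm, t', by rw [← hp.2]⟩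
        rw [if_pos hp]
        have hd : List.drop ([',',' '] : List Char).length (',' :: ' ' :: t') = t' := rfl
        rw [hd]
        rw [ih t' [] (cur.reverse :: accs) (by simp at h ⊢; omega)]
        rw [splitCS]
        rw [if_pos (by simp)]
        have h2 : (splitCS t').modifyHead (fun x => List.reverse [] ++ x) = splitCS t' := by
          cases hsp : (splitCS t') <;> simp
        simp only [List.tail_cons]
        rw [h2]
        simp
      · rw [if_neg hp]
        rw [ih t (c :: cur) accs (by simp at h ⊢; omega)]
        have hnc : ¬(c = ',' ∧ t.head? = some ' ') := by
          rintro ⟨rfl, hh⟩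
          cases t with
          | nil => simp at hh
          | cons d t' => simp at hh; subst hh; simp [List.isPrefixOf] at hp
        rw [splitCS, if_neg hnc, List.modifyHead_modifyHead]
        cases (splitCS t) <;> simp

def splitSl : List Char → List (List Char)
  | [] => [[]]
  | c :: t => if c = '/' then [] :: splitSl t else (splitSl t).modifyHead (c :: ·)

def repl : List Char → List Char
  | [] => []
  | c :: t => if c = '/' then ',' :: ' ' :: repl t else c :: repl t

theorem go_spec_sl (fuel : Nat) : ∀ (l cur : List Char) (accs : List (List Char)),
    l.length ≤ fuel →
    PySem.Chars.splitOn.go ['/'] fuel l cur accs =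
      accs.reverse ++ (splitSl l).modifyHead (cur.reverse ++ ·) := by
  induction fuel with
  | zero =>
    intro l cur accs h
    have hl : l = [] := by cases l <;> simp_all
    subst hl
    rw [PySem.Chars.splitOn.go]
    simp [splitSl]
  | succ n ih =>
    intro l cur accs h
    cases l with
    | nil =>
      rw [PySem.Chars.splitOn.go]
      simp [splitSl]
      omega
    | cons c t =>
      rw [PySem.Chars.splitOn.go]
      by_cases hc : c = '/'
      · subst hc
        rw [if_pos (by simp [List.isPrefixOf])]
        have hd : List.drop (['/'] : List Char).length ('/' :: t) = t := rfl
        rw [hd]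
        rw [ih t [] (cur.reverse :: accs) (by simp at h ⊢; omega)]
        rw [splitSl, if_pos rfl]
        have h2 : (splitSl t).modifyHead (fun x => List.reverse [] ++ x) = splitSl t := by
          cases hsp : splitSl t <;> simp
        rw [h2]
        simp
      · rw [if_neg (by simp [List.isPrefixOf]; exact fun h' => hc h'.symm)]
        rw [ih t (c :: cur) accs (by simp at h ⊢; omega)]
        rw [splitSl, if_neg hc, List.modifyHead_modifyHead]
        cases splitSl t <;> simp

theorem splitOn_cs (l : List Char) : PySem.Chars.splitOn l [',', ' '] = splitCS l := by
  rw [PySem.Chars.splitOn, go_spec_cs (l.length + 1) l [] [] (by omega)]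
  cases h : splitCS l <;> simp

theorem splitOn_sl (l : List Char) : PySem.Chars.splitOn l ['/'] = splitSl l := by
  rw [PySem.Chars.splitOn, go_spec_sl (l.length + 1) l [] [] (by omega)]
  cases h : splitSl l <;> simp

theorem repgo_spec (fuel : Nat) : ∀ (l acc : List Char),
    l.length ≤ fuel →
    PySem.Chars.replace.go ['/'] [',', ' '] fuel l acc = acc.reverse ++ repl l := by
  induction fuel with
  | zero =>
    intro l acc h
    have hl : l = [] := by cases l <;> simp_all
    subst hl
    rw [PySem.Chars.replace.go]
    simp [repl]
  | succ n ih =>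
    intro l acc h
    cases l with
    | nil =>
      rw [PySem.Chars.replace.go]
      simp [repl]
      omega
    | cons c t =>
      rw [PySem.Chars.replace.go]
      by_cases hc : c = '/'
      · subst hc
        rw [if_pos (by simp [List.isPrefixOf])]
        have hd : List.drop (['/'] : List Char).length ('/' :: t) = t := rfl
        rw [hd]
        rw [ih t _ (by simp at h ⊢; omega)]
        rw [repl, if_pos rfl]
        simp
      · rw [if_neg (by simp [List.isPrefixOf]; exact fun h' => hc h'.symm)]
        rw [ih t (c :: acc) (by simp at h ⊢; omega)]
        rw [repl, if_neg hc]
        simp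

theorem replace_eq_repl (l : List Char) : PySem.Chars.replace l ['/'] [',', ' '] = repl l := by
  rw [PySem.Chars.replace]
  rw [if_neg (by simp)]
  rw [repgo_spec l.length l [] (by omega)]
  simp

theorem splitCS_ne_nil (l : List Char) : splitCS l ≠ [] := by
  fun_induction splitCS l <;> simp [*]

theorem splitSl_ne_nil (l : List Char) : splitSl l ≠ [] := by
  fun_induction splitSl l <;> simp [*]

theorem splitSl_no_slash (l : List Char) (h : '/' ∉ l) : splitSl l = [l] := by
  induction l with
  | nil => rfl
  | cons c t ih =>
    rw [splitSl, if_neg (by simp at h; exact fun e => h.1 e.symm), ih (by simp at h; exact h.2)]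
    rfl

theorem head_repl (t : List Char) : (repl t).head? = some ' ' ↔ t.head? = some ' ' := by
  cases t with
  | nil => simp [repl]
  | cons d t' =>
    rw [repl]
    by_cases hd : d = '/'
    · subst hd; simp
    · simp [hd]

theorem flatMap_modifyHead_cons (c : Char) (xs : List (List Char)) (hx : xs ≠ []) (hc : c ≠ '/') :
    (xs.modifyHead (c :: ·)).flatMap splitSl = (xs.flatMap splitSl).modifyHead (c :: ·) := by
  cases xs with
  | nil => simp at hx
  | cons hhead rest =>
    simp only [List.modifyHead_cons, List.flatMap_cons]
    rw [splitSl, if_neg hc]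
    cases hsp : splitSl hhead with
    | nil => exact absurd hsp (splitSl_ne_nil hhead)
    | cons a b => simp

theorem flatMap_slash (xs : List (List Char)) (hx : xs ≠ []) :
    (xs.modifyHead ('/' :: ·)).flatMap splitSl = [] :: xs.flatMap splitSl := by
  cases xs with
  | nil => simp at hx
  | cons hhead rest =>
    simp only [List.modifyHead_cons, List.flatMap_cons]
    rw [splitSl, if_pos rfl]
    simp

theorem main_lemma : ∀ (n : Nat) (s : List Char), s.length ≤ n →
    splitCS (repl s) = (splitCS s).flatMap splitSl := by
  intro n
  induction n with
  | zero =>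
    intro s h
    have hs : s = [] := by cases s <;> simp_all
    subst hs
    simp [repl, splitCS, splitSl]
  | succ n ih =>
    intro s h
    cases s with
    | nil => simp [repl, splitCS, splitSl]
    | cons c t =>
      by_cases hcs : c = ',' ∧ t.head? = some ' '
      · obtain ⟨rfl, hh⟩ := hcs
        obtain ⟨t', rfl⟩ : ∃ t', t = ' ' :: t' := by
          cases t with
          | nil => simp at hh
          | cons d t' => simp at hh; exact ⟨t', by rw [hh]⟩
        rw [repl, if_neg (by decide), repl, if_neg (by decide)]
        rw [splitCS, if_pos ⟨rfl, rfl⟩]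
        simp only [List.tail_cons]
        rw [ih t' (by simp at h ⊢; omega)]
        rw [splitCS, if_pos ⟨rfl, rfl⟩]
        simp only [List.tail_cons, List.flatMap_cons]
        rw [splitSl]
        rfl
      · by_cases hsl : c = '/'
        · subst hsl
          rw [repl, if_pos rfl]
          rw [splitCS, if_pos ⟨rfl, rfl⟩]
          simp only [List.tail_cons]
          rw [ih t (by simp at h ⊢; omega)]
          rw [splitCS, if_neg (by simp)]
          rw [flatMap_slash _ (splitCS_ne_nil t)]
        · rw [repl, if_neg hsl]
          rw [splitCS, if_neg (fun hx => hcs ⟨hx.1, (head_repl t).mp hx.2⟩)]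
          rw [ih t (by simp at h ⊢; omega)]
          rw [splitCS, if_neg hcs]
          rw [flatMap_modifyHead_cons c _ (splitCS_ne_nil t) hsl]

theorem foldA (ys : List (List String ⊕ String)) (acc : List String) :
    ys.foldl (fun acc x =>
      match x with
      | Sum.inl l => l.foldl (fun acc2 y => acc2 ++ [y]) acc
      | Sum.inr a => acc ++ [a]) acc =
    acc ++ ys.flatMap (fun x => match x with | Sum.inl l => l | Sum.inr a => [a]) := by
  induction ys generalizing acc with
  | nil => simp
  | cons y ys ih =>
    cases y with
    | inl l =>
      simp only [List.foldl_cons, List.flatMap_cons]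
      rw [ih, PySem.List.foldl_append_singleton]
      simp
    | inr a =>
      simp only [List.foldl_cons, List.flatMap_cons]
      rw [ih]
      simp

theorem elemA (cs : List Char) :
    (fun x => match x with | Sum.inl l => l | Sum.inr a => [a])
      (if PySem.Str.isIn "/" (String.ofList cs) = true then
         Sum.inl ((PySem.Str.split? (String.ofList cs) "/").getD [])
       else Sum.inr (String.ofList cs))
    = (splitSl cs).map String.ofList := by
  by_cases hin : PySem.Str.isIn "/" (String.ofList cs) = true
  · rw [if_pos hin]
    simp only [PySem.Str.split?, PySem.Chars.split?]
    rw [if_neg (by decide)]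
    have hv : ("/" : String).toList = ['/'] := by decide
    simp only [String.toList_ofList, hv, splitOn_sl]
    simp
  · rw [if_neg hin]
    have hno : '/' ∉ cs := by
      simp only [PySem.Str.isIn, String.toList_ofList] at hin
      have hv : ("/" : String).toList = ['/'] := by decide
      rw [hv] at hin
      rw [Bool.not_eq_true, PySem.Chars.isIn_eq_false_iff] at hin
      exact fun hm => hin ((List.singleton_infix_iff _ _).mpr hm)
    rw [splitSl_no_slash cs hno]
    simp

theorem A_char (s : String) :
    split_areas s = ((splitCS s.toList).flatMap splitSl).map String.ofList := by
  have houter : (PySem.Str.split? s ", ").getD [] = (splitCS s.toList).map String.ofList := by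
    simp only [PySem.Str.split?, PySem.Chars.split?]
    rw [if_neg (by decide), show (", " : String).toList = [',', ' '] from by decide, splitOn_cs]
    simp
  rw [split_areas]
  simp only [houter]
  rw [List.map_map, foldA]
  simp only [List.nil_append, List.flatMap_map]
  have hfun : (fun a : List Char =>
      match ((fun a => if PySem.Str.isIn "/" a = true then
          Sum.inl ((PySem.Str.split? a "/").getD []) else Sum.inr a) ∘ String.ofList) a with
      | Sum.inl l => l
      | Sum.inr a => [a]) = fun cs : List Char => (splitSl cs).map String.ofList :=
    funext fun cs => elemA cs
  rw [hfun, ← List.map_flatMap]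

theorem B_char (s : String) :
    split_areas_alt s = (splitCS (repl s.toList)).map String.ofList := by
  rw [split_areas_alt]
  simp only [PySem.Str.split?, PySem.Chars.split?]
  rw [if_neg (by decide)]
  have hsep : (", " : String).toList = [',', ' '] := by decide
  simp only [PySem.Str.replace, String.toList_ofList, hsep]
  have hv : ("/" : String).toList = ['/'] := by decide
  rw [hv, replace_eq_repl, splitOn_cs]
  simp

-- ===== VERDICT (by name: the statement is the Claim_ definition above) =====
theorem split_areas_spec : Claim_equal_split_areas := by
  intro s _
  show split_areas s = split_areas_alt s
  rw [A_char, B_char, main_lemma s.toList.length s.toList le_rfl]
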